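-- pv_equiv track=rewrite | github.com/luizlcezario/Processamento-da-Informacao-Ufabc | aulas5/Prova1_maior_solucao.py | Maximuns
-- ===== SOURCE A (Python) =====
-- def Maximuns(ListRes):
--   Reslist = []
--   numberToFind = ListRes[0][0];
--   for i in range(len(ListRes)):
--     if(ListRes[i][0] >= numberToFind):
--       numberToFind = ListRes[i][0]
--   for i in range(len(ListRes)):
--     if(ListRes[i][0] == numberToFind):
--       Reslist.append(ListRes[i])
--   return(Reslist)
-- ===== SOURCE B (Python) =====
-- def Maximuns(ListRes):
--   best = ListRes[0][0]
--   Reslist = []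
--   for elem in ListRes:
--     if elem[0] > best:
--       best = elem[0]
--       Reslist = [elem]
--     elif elem[0] == best:
--       Reslist.append(elem)
--   return Reslist
-- ===== Notes on version B (the rewrite author's own statement) =====
-- stated objective: alternative
-- what changed: Replaces A's two full index-based passes (find the max head, then re-scan collecting matches) with a single element scan that keeps a running maximum and resets the collected list whenever a strictly larger head appears.
import Mathlib
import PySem

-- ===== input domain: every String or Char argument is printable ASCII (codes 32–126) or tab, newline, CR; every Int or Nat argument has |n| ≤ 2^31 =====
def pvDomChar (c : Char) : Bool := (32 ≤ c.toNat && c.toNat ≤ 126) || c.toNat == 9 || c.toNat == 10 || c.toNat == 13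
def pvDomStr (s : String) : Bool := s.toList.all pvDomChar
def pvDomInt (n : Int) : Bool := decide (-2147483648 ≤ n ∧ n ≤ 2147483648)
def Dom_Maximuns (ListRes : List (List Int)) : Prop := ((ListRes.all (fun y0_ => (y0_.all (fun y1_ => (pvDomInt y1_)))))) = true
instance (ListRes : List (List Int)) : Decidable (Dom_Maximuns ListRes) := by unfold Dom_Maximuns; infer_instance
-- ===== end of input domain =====

-- B replaces A's two index passes (find max head, then collect matches) by one element scan with a
-- running maximum that resets the collected list on a strictly larger head; same cost, one pass.

-- ===== PORT A =====
def Maximuns (ListRes : List (List Int)) : List (List Int) :=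
  -- Reslist = []; numberToFind = ListRes[0][0]
  let numberToFind0 : Int := PySem.List.pyGetD (PySem.List.pyGetD ListRes 0 []) 0 0
  -- first loop: for i in range(len(ListRes)): if ListRes[i][0] >= numberToFind: numberToFind = ListRes[i][0]
  let numberToFind : Int :=
    (PySem.List.pyRange 0 (ListRes.length : Int) 1).foldl
      (fun n i =>
        if PySem.List.pyGetD (PySem.List.pyGetD ListRes i []) 0 0 ≥ n
        then PySem.List.pyGetD (PySem.List.pyGetD ListRes i []) 0 0 else n)
      numberToFind0
  -- second loop: for i in range(len(ListRes)): if ListRes[i][0] == numberToFind: Reslist.append(ListRes[i])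
  (PySem.List.pyRange 0 (ListRes.length : Int) 1).foldl
    (fun acc i =>
      if PySem.List.pyGetD (PySem.List.pyGetD ListRes i []) 0 0 = numberToFind
      then acc ++ [PySem.List.pyGetD ListRes i []] else acc)
    []

-- ===== PORT B =====
def Maximuns_alt (ListRes : List (List Int)) : List (List Int) :=
  -- best = ListRes[0][0]; Reslist = []
  let best0 : Int := PySem.List.pyGetD (PySem.List.pyGetD ListRes 0 []) 0 0
  -- single pass: for elem in ListRes: …
  (ListRes.foldl
    (fun (s : Int × List (List Int)) elem =>
      if PySem.List.pyGetD elem 0 0 > s.1 then (PySem.List.pyGetD elem 0 0, [elem])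
      else if PySem.List.pyGetD elem 0 0 = s.1 then (s.1, s.2 ++ [elem])
      else s)
    (best0, [])).2

-- ===== PRECONDITION & SPEC =====
-- Pre_ excludes exactly the inputs on which Python A raises IndexError: the empty list
-- (ListRes[0][0]) and lists containing an empty row (ListRes[i][0]).
def Pre_Maximuns (ListRes : List (List Int)) : Prop :=
  ListRes ≠ [] ∧ ∀ r ∈ ListRes, r ≠ []
instance (ListRes : List (List Int)) : Decidable (Pre_Maximuns ListRes) := by
  unfold Pre_Maximuns; infer_instance
def pvWitness_Maximuns : List (List Int) := [[3, 1], [2], [3]]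

def Spec_Maximuns (ListRes : List (List Int)) (out : List (List Int)) : Prop := out = Maximuns_alt ListRes
instance (ListRes : List (List Int)) (out : List (List Int)) : Decidable (Spec_Maximuns ListRes out) := by unfold Spec_Maximuns; infer_instance

-- ===== CLAIM (what is proved, stated in full; the proofs are below) =====
def Claim_equal_Maximuns : Prop := ∀ (ListRes : List (List Int)), Dom_Maximuns ListRes → Pre_Maximuns ListRes → Spec_Maximuns ListRes (Maximuns ListRes)

-- ===== LEMMAS AND PROOFS =====

-- the running-maximum fold shared (after loop-shape rewriting) by both ports
def pvMax (b : Int) (L : List (List Int)) : Int :=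
  L.foldl (fun n r => if PySem.List.pyGetD r 0 0 ≥ n then PySem.List.pyGetD r 0 0 else n) b

theorem pvMax_le (L : List (List Int)) : ∀ b : Int, b ≤ pvMax b L := by
  induction L with
  | nil => intro b; simp [pvMax]
  | cons e t ih =>
    intro b
    simp only [pvMax, List.foldl_cons]
    split
    · exact le_trans (by omega) (ih _)
    · exact ih b

-- B's fold characterised: final best is pvMax, result is the filter, with the accumulator kept
-- exactly when no strictly larger head appears.
theorem pvBfold (L : List (List Int)) : ∀ (b : Int) (acc : List (List Int)),
    L.foldl
      (fun (s : Int × List (List Int)) elem =>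
        if PySem.List.pyGetD elem 0 0 > s.1 then (PySem.List.pyGetD elem 0 0, [elem])
        else if PySem.List.pyGetD elem 0 0 = s.1 then (s.1, s.2 ++ [elem])
        else s)
      (b, acc)
    = (pvMax b L,
       (if pvMax b L = b then acc else []) ++
         L.filter (fun r => PySem.List.pyGetD r 0 0 = pvMax b L)) := by
  induction L with
  | nil => intro b acc; simp [pvMax]
  | cons e t ih =>
    intro b acc
    have hm : pvMax b (e :: t)
        = pvMax (if PySem.List.pyGetD e 0 0 ≥ b then PySem.List.pyGetD e 0 0 else b) t := by
      simp [pvMax]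
    by_cases hgt : PySem.List.pyGetD e 0 0 > b
    · have hge : PySem.List.pyGetD e 0 0 ≥ b := le_of_lt hgt
      have hM : pvMax b (e :: t) = pvMax (PySem.List.pyGetD e 0 0) t := by
        rw [hm, if_pos hge]
      have hMb : pvMax (PySem.List.pyGetD e 0 0) t ≠ b := by
        have := pvMax_le t (PySem.List.pyGetD e 0 0)
        omega
      simp only [List.foldl_cons, if_pos hgt]
      rw [ih, hM, if_neg hMb, List.filter_cons]
      by_cases he : PySem.List.pyGetD e 0 0 = pvMax (PySem.List.pyGetD e 0 0) t
      · rw [if_pos he.symm, if_pos (decide_eq_true he)]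
        simp
      · rw [if_neg (fun h => he h.symm), if_neg (by simpa using he)]
    · simp only [List.foldl_cons, if_neg hgt]
      by_cases heq : PySem.List.pyGetD e 0 0 = b
      · have hM : pvMax b (e :: t) = pvMax b t := by
          rw [hm, if_pos (le_of_eq heq.symm), heq]
        simp only [if_pos heq]
        rw [ih, hM, List.filter_cons]
        by_cases hMb : pvMax b t = b
        · rw [if_pos hMb, if_pos hMb, if_pos (decide_eq_true (by rw [heq, hMb]))]
          simp
        · have hne : ¬ (PySem.List.pyGetD e 0 0 = pvMax b t) := by
            rw [heq]; exact fun h => hMb h.symm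
          simp [hne, hMb]
      · have hlt : ¬ (PySem.List.pyGetD e 0 0 ≥ b) := by omega
        have hM : pvMax b (e :: t) = pvMax b t := by rw [hm, if_neg hlt]
        simp only [if_neg heq]
        rw [ih, hM, List.filter_cons]
        have hne : ¬ (PySem.List.pyGetD e 0 0 = pvMax b t) := by
          have := pvMax_le t b; omega
        simp [hne]

theorem Maximuns_eq (ListRes : List (List Int)) : Maximuns ListRes = Maximuns_alt ListRes := by
  simp only [Maximuns, Maximuns_alt]
  rw [PySem.List.foldl_pyRange_zero_pyGetD' ListRes ([] : List Int)
      (fun n r => if PySem.List.pyGetD r 0 0 ≥ n then PySem.List.pyGetD r 0 0 else n)]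
  generalize hN : List.foldl
      (fun n r => if PySem.List.pyGetD r 0 0 ≥ n then PySem.List.pyGetD r 0 0 else n)
      (PySem.List.pyGetD (PySem.List.pyGetD ListRes 0 []) 0 0) ListRes = N
  rw [PySem.List.foldl_pyRange_zero_pyGetD' ListRes ([] : List Int)
      (fun acc r => if PySem.List.pyGetD r 0 0 = N then acc ++ [r] else acc)]
  rw [PySem.List.foldl_append_ite_eq_filter]
  rw [pvBfold]
  have hpv : pvMax (PySem.List.pyGetD (PySem.List.pyGetD ListRes 0 []) 0 0) ListRes = N := hN
  rw [hpv]
  simp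

-- ===== VERDICT (by name: the statement is the Claim_ definition above) =====
theorem Maximuns_spec : Claim_equal_Maximuns := by
  intro L _ _
  unfold Spec_Maximuns
  exact Maximuns_eq L
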